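-- pv_equiv track=rewrite | github.com/Lyon117/FYP-1 | Src/LockerSystem/System.py | Time
-- ===== SOURCE A (Python) =====
-- def Time(time_data):
--     if type(time_data) == int:
--         time_data_byte_list = [(time_data % (256 ** -i)) // (256 ** (-i - 1)) for i in range(-8, 0)]
--         return time_data_byte_list
--     elif type(time_data) == list:
--         time_data = sum([time_data[i] * (256 ** (-i - 1)) for i in range(-8, 0)])
--         return time_data
--     else:
--         raise TypeError('Input value should be an integer or a list')
-- ===== SOURCE B (Python) =====
-- def Time(time_data):
--     if type(time_data) == int:
--         n = time_data % (256 ** 8)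
--         out = []
--         for _ in range(8):
--             n, b = divmod(n, 256)
--             out = [b] + out
--         return out
--     elif type(time_data) == list:
--         result = 0
--         for i in range(-8, 0):
--             result = result * 256 + time_data[i]
--         return result
--     else:
--         raise TypeError('Input value should be an integer or a list')
-- ===== Notes on version B (the rewrite author's own statement) =====
-- stated objective: alternative
-- what changed: Replaces the per-index power-based comprehension (independent % and // with 256**k for each position) by an iterative divmod loop that repeatedly reduces n and prepends each byte (and a Horner accumulation for the list branch).
import Mathlib
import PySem

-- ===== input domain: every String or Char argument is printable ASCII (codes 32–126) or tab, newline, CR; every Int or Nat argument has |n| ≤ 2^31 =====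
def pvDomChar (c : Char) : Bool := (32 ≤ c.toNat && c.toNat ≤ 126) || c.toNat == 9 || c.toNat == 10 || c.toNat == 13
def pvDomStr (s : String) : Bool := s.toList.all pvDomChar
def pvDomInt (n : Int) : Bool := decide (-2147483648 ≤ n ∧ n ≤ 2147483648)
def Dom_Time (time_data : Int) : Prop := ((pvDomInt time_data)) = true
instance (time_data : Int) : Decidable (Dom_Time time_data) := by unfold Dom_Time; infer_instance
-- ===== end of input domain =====

-- B replaces A's independent power-based byte extraction by an iterative divmod loop (alternative decomposition, same cost).
-- Only the int branch of the Python function is in scope here: the argument is an Int by the type convention.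

-- ===== PORT A =====
-- [(time_data % (256 ** -i)) // (256 ** (-i - 1)) for i in range(-8, 0)]
-- (on this range -i > 0 and -i-1 ≥ 0, so the Python exponents are the Nats (-i).toNat and (-i-1).toNat — exact here)
def Time (time_data : Int) : List Int :=
  (PySem.List.pyRange (-8) 0 1).map (fun i =>
    PySem.Int.floordiv (PySem.Int.mod time_data ((256 : Int) ^ (-i).toNat))
      ((256 : Int) ^ (-i - 1).toNat))

-- ===== PORT B =====
-- reduce n = time_data mod 256**eight by repeated n, b = divmod(n, 256), prepending each b
def Time_alt (time_data : Int) : List Int :=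
  ((List.range 8).foldl
    (fun (p : Int × List Int) _ =>
      (PySem.Int.floordiv p.1 256, PySem.Int.mod p.1 256 :: p.2))
    (PySem.Int.mod time_data ((256 : Int) ^ (8 : Nat)), [])).2

-- ===== PRECONDITION & SPEC =====
def Spec_Time (time_data : Int) (out : List Int) : Prop := out = Time_alt time_data
instance (time_data : Int) (out : List Int) : Decidable (Spec_Time time_data out) := by unfold Spec_Time; infer_instance

-- ===== CLAIM (what is proved, stated in full; the proofs are below) =====
def Claim_equal_Time : Prop := ∀ (time_data : Int), Dom_Time time_data → Spec_Time time_data (Time time_data)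

-- ===== LEMMAS AND PROOFS =====

theorem pyRange_m8 : PySem.List.pyRange (-8) 0 1 = [-8, -7, -6, -5, -4, -3, -2, -1] := by decide

-- ===== VERDICT (by name: the statement is the Claim_ definition above) =====
theorem Time_spec : Claim_equal_Time := by
  intro t _
  have hd : ∀ (a b : Int), 0 < b → PySem.Int.floordiv a b = a / b :=
    fun a b h => PySem.Int.floordiv_eq_ediv_of_pos h
  have hm : ∀ (a b : Int), 0 < b → PySem.Int.mod a b = a % b :=
    fun a b h => PySem.Int.mod_eq_emod_of_pos h
  unfold Spec_Time Time Time_alt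
  rw [pyRange_m8]
  simp only [List.range_succ, List.foldl_append, List.foldl_cons, List.foldl_nil, List.map,
    List.range_zero, List.nil_append]
  norm_num [hd _ _ (by norm_num : (0:Int) < 256),
    hd _ _ (by norm_num : (0:Int) < 256^8), hm _ _ (by norm_num : (0:Int) < 256),
    hm _ _ (by norm_num : (0:Int) < 256^8)]
  simp only [show (((2:Int)).toNat) = 2 from rfl, show (((3:Int)).toNat) = 3 from rfl, show (((4:Int)).toNat) = 4 from rfl, show (((5:Int)).toNat) = 5 from rfl, show (((6:Int)).toNat) = 6 from rfl, show (((7:Int)).toNat) = 7 from rfl, show (((8:Int)).toNat) = 8 from rfl]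
  refine ⟨?_, ?_, ?_, ?_, ?_, ?_, ?_⟩
  · norm_num [Int.ediv_ediv_of_nonneg]
    rw [show (t % 18446744073709551616 : Int) = t % 18446744073709551616 % 18446744073709551616 from (Int.emod_emod_of_dvd t (by norm_num)).symm]
    omega
  · norm_num [Int.ediv_ediv_of_nonneg]
    rw [show (t % 72057594037927936 : Int) = t % 18446744073709551616 % 72057594037927936 from (Int.emod_emod_of_dvd t (by norm_num)).symm]
    omega
  · norm_num [Int.ediv_ediv_of_nonneg]
    rw [show (t % 281474976710656 : Int) = t % 18446744073709551616 % 281474976710656 from (Int.emod_emod_of_dvd t (by norm_num)).symm]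
    omega
  · norm_num [Int.ediv_ediv_of_nonneg]
    rw [show (t % 1099511627776 : Int) = t % 18446744073709551616 % 1099511627776 from (Int.emod_emod_of_dvd t (by norm_num)).symm]
    omega
  · norm_num [Int.ediv_ediv_of_nonneg]
    rw [show (t % 4294967296 : Int) = t % 18446744073709551616 % 4294967296 from (Int.emod_emod_of_dvd t (by norm_num)).symm]
    omega
  · norm_num [Int.ediv_ediv_of_nonneg]
    rw [show (t % 16777216 : Int) = t % 18446744073709551616 % 16777216 from (Int.emod_emod_of_dvd t (by norm_num)).symm]
    omega
  · norm_num [Int.ediv_ediv_of_nonneg]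
    rw [show (t % 65536 : Int) = t % 18446744073709551616 % 65536 from (Int.emod_emod_of_dvd t (by norm_num)).symm]
    omega
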